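-- pv_equiv track=rewrite | github.com/marbl/ModDotPlot | src/moddotplot/estimate_identity.py | find_value_in_range
-- ===== SOURCE A (Python) =====
-- def find_value_in_range(integer: int, range_dict: dict) -> int:
--     if integer > max(key[0] for key in range_dict.keys()):
--         return 0
--     highest_value = max(range_dict.values()) + 1
--     for key, value in range_dict.items():
--         if key[0] >= integer >= key[1]:
--             return value
--     return highest_value
-- ===== SOURCE B (Python) =====
-- def find_value_in_range(integer: int, range_dict: dict) -> int:
--     # Backward traversal, no early exit: walk the items back-to-front carrying
--     # (match-so-far, max high, max value); an earlier item's match overwrites a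
--     # later one's, so after the loop `res` is the FIRST matching value, and the
--     # fallback (0 vs max_val + 1) is decided once at the end.
--     res = max_high = max_val = None
--     for (high, low), value in reversed(list(range_dict.items())):
--         if high >= integer >= low:
--             res = value
--         if max_high is None or high > max_high:
--             max_high = high
--         if max_val is None or value > max_val:
--             max_val = value
--     if max_high is None:
--         return 0  # empty dict (A raises ValueError here; outside Pre_)
--     if res is not None:
--         return res
--     return 0 if integer > max_high else max_val + 1
-- ===== Notes on version B (the rewrite author's own statement) =====
-- stated objective: alternative
-- what changed: Replaces A's staged computation (max over keys, max over values, then a forward search that returns early) by one backward traversal with no early exit: it carries (match-so-far, max high, max value) over reversed(items), earlier matches overwrite later ones, and the answer (first match, 0, or max_val+1) is decided once after the loop.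
-- outside the precondition, e.g. on find_value_in_range(5, {}): A raises ValueError, B returns 0
import Mathlib
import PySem

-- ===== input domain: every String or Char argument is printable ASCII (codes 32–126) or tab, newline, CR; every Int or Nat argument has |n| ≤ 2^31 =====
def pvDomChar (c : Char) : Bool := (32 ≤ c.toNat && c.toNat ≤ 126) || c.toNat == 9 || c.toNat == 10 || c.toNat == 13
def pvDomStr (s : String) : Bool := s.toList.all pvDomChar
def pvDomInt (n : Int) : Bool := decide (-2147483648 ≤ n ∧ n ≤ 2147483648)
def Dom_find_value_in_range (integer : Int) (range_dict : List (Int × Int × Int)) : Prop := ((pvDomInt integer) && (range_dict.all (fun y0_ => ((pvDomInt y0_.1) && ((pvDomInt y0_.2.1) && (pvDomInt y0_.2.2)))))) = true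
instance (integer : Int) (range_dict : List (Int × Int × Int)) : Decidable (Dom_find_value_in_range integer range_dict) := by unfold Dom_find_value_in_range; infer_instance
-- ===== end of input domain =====

-- B replaces A's staged passes + forward early-return scan by one backward traversal with
-- no early exit (earlier matches overwrite later ones); same values everywhere A returns.

-- ===== PORT A =====
-- Python's max over a nonempty iterable: seed with the first element, fold max over the rest
-- (returns none exactly where Python raises ValueError: the empty iterable).
def pyMax? (xs : List Int) : Option Int :=
  xs.foldl (fun acc x => match acc with | none => some x | some m => some (max m x)) none

-- the `for key, value in range_dict.items(): if key[0] >= integer >= key[1]: return value` loop,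
-- falling through to `return highest_value`
def scanA (integer : Int) : List (Int × Int × Int) → Int → Int
  | [], highest => highest
  | (k0, k1, v) :: rest, highest =>
      if k0 ≥ integer ∧ integer ≥ k1 then v else scanA integer rest highest

def find_value_in_range (integer : Int) (range_dict : List (Int × Int × Int)) : Int :=
  match pyMax? (range_dict.map (·.1)) with
  | none => 0  -- ValueError on empty dict; excluded by Pre_
  | some mk =>
    if integer > mk then 0
    else
      match pyMax? (range_dict.map (fun t => t.2.2)) with
      | none => 0  -- unreachable: same emptiness as above
      | some mv => scanA integer range_dict (mv + 1)

-- ===== PORT B =====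
-- one iteration of Source B's `for (high, low), value in reversed(list(items))` loop
def stepB (integer : Int) (st : Option Int × Option Int × Option Int) (x : Int × Int × Int) :
    Option Int × Option Int × Option Int :=
  let res := if x.1 ≥ integer ∧ integer ≥ x.2.1 then some x.2.2 else st.1
  let maxHigh := some (match st.2.1 with | none => x.1 | some h => if x.1 > h then x.1 else h)
  let maxVal := some (match st.2.2 with | none => x.2.2 | some m => if x.2.2 > m then x.2.2 else m)
  (res, maxHigh, maxVal)

def find_value_in_range_alt (integer : Int) (range_dict : List (Int × Int × Int)) : Int :=
  let st := range_dict.reverse.foldl (stepB integer) (none, none, none)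
  match st.2.1 with
  | none => 0  -- empty dict branch of Source B
  | some mh =>
    match st.1 with
    | some v => v
    | none => if integer > mh then 0 else (match st.2.2 with | some m => m + 1 | none => 0)

-- ===== PRECONDITION & SPEC =====
-- Pre_ excludes only the empty dict, on which A raises ValueError (max() of an empty sequence).
def Pre_find_value_in_range (integer : Int) (range_dict : List (Int × Int × Int)) : Prop :=
  range_dict ≠ []
instance (integer : Int) (range_dict : List (Int × Int × Int)) : Decidable (Pre_find_value_in_range integer range_dict) := by unfold Pre_find_value_in_range; infer_instance

def pvWitness_find_value_in_range : Int × (List (Int × Int × Int)) := (3, [(5, 1, 7), (0, -2, 9)])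

def Spec_find_value_in_range (integer : Int) (range_dict : List (Int × Int × Int)) (out : Int) : Prop := out = find_value_in_range_alt integer range_dict
instance (integer : Int) (range_dict : List (Int × Int × Int)) (out : Int) : Decidable (Spec_find_value_in_range integer range_dict out) := by unfold Spec_find_value_in_range; infer_instance

-- ===== CLAIM (what is proved, stated in full; the proofs are below) =====
def Claim_equal_find_value_in_range : Prop := ∀ (integer : Int) (range_dict : List (Int × Int × Int)), Dom_find_value_in_range integer range_dict → Pre_find_value_in_range integer range_dict → Spec_find_value_in_range integer range_dict (find_value_in_range integer range_dict)

-- ===== LEMMAS AND PROOFS =====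

-- value of the first range containing `integer`, if any
def firstMatch? (integer : Int) : List (Int × Int × Int) → Option Int
  | [] => none
  | (k0, k1, v) :: rest =>
      if k0 ≥ integer ∧ integer ≥ k1 then some v else firstMatch? integer rest

-- max of a list, shaped like B's running-max update
def maxR : List Int → Option Int
  | [] => none
  | x :: t => some (match maxR t with | none => x | some m => if x > m then x else m)

lemma foldl_max_comm (s : List Int) (a b : Int) :
    s.foldl max (max a b) = max a (s.foldl max b) := by
  induction s generalizing a b with
  | nil => rfl
  | cons c t ih => simp only [List.foldl_cons, max_assoc, ih]

lemma maxR_cons_eq (x : Int) (t : List Int) : maxR (x :: t) = some (t.foldl max x) := by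
  induction t generalizing x with
  | nil => rfl
  | cons y s ih =>
      calc maxR (x :: y :: s)
          = some (match maxR (y :: s) with | none => x | some m => if x > m then x else m) := rfl
        _ = some (if x > s.foldl max y then x else s.foldl max y) := by rw [ih y]
        _ = some ((y :: s).foldl max x) := by
            rw [List.foldl_cons, foldl_max_comm, max_def]
            congr 1
            split_ifs <;> omega

lemma pyMax?_foldl_some (xs : List Int) (m : Int) :
    xs.foldl (fun acc x => match acc with | none => some x | some m => some (max m x)) (some m)
      = some (xs.foldl max m) := by
  induction xs generalizing m with
  | nil => rfl
  | cons a t ih => simp [List.foldl, ih]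

lemma pyMax?_cons (a : Int) (xs : List Int) :
    pyMax? (a :: xs) = some (xs.foldl max a) := by
  simp [pyMax?, List.foldl, pyMax?_foldl_some]

lemma scanA_eq (integer : Int) (l : List (Int × Int × Int)) (h : Int) :
    scanA integer l h = (firstMatch? integer l).getD h := by
  induction l with
  | nil => rfl
  | cons x t ih =>
      obtain ⟨k0, k1, v⟩ := x
      by_cases hc : k0 ≥ integer ∧ integer ≥ k1 <;> simp [scanA, firstMatch?, hc, ih]

lemma mem_le_foldl_max (xs : List Int) (a : Int) (b : Int) (hb : b ∈ xs) :
    b ≤ xs.foldl max a := by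
  induction xs generalizing a with
  | nil => cases hb
  | cons c t ih =>
      rcases List.mem_cons.mp hb with h | h
      · subst h
        calc b ≤ max a b := le_max_right a b
          _ ≤ t.foldl max (max a b) := (PySem.List.le_foldl_max _ _).1
      · exact ih (max a c) h

lemma firstMatch?_none_of_gt (integer : Int) (l : List (Int × Int × Int))
    (h : ∀ k ∈ l.map (·.1), k < integer) : firstMatch? integer l = none := by
  induction l with
  | nil => rfl
  | cons x t ih =>
      obtain ⟨k0, k1, v⟩ := x
      have hk0 : k0 < integer := h k0 (by simp)
      have : ¬ (k0 ≥ integer ∧ integer ≥ k1) := by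
        rintro ⟨h1, _⟩; omega
      simp [firstMatch?, this]
      exact ih (fun k hk => h k (by simp [hk]))

-- the backward fold computes (first match, max of highs, max of values)
lemma foldB_eq (integer : Int) (l : List (Int × Int × Int)) :
    l.reverse.foldl (stepB integer) (none, none, none)
      = (firstMatch? integer l, maxR (l.map (·.1)), maxR (l.map (fun t => t.2.2))) := by
  rw [List.foldl_reverse]
  induction l with
  | nil => rfl
  | cons x t ih =>
      obtain ⟨k0, k1, v⟩ := x
      simp only [List.foldr_cons]
      rw [ih]
      simp [stepB, firstMatch?, maxR]

-- ===== VERDICT (by name: the statement is the Claim_ definition above) =====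
theorem find_value_in_range_spec : Claim_equal_find_value_in_range := by
  intro integer range_dict _ hpre
  unfold Spec_find_value_in_range
  match range_dict, hpre with
  | (k0, k1, v) :: rest, _ =>
    unfold find_value_in_range find_value_in_range_alt
    rw [foldB_eq]
    simp only [List.map_cons, pyMax?_cons, maxR_cons_eq]
    by_cases hg : integer > (rest.map (·.1)).foldl max k0
    · -- A returns 0; B: no match anywhere (every high < integer), so fallback 0
      have hnm : firstMatch? integer ((k0, k1, v) :: rest) = none := by
        apply firstMatch?_none_of_gt
        intro k hk
        rcases List.mem_cons.mp hk with h | h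
        · have h1 := (PySem.List.le_foldl_max (rest.map (·.1)) k0).1
          have h2 : k = k0 := h
          omega
        · have h1 := mem_le_foldl_max (rest.map (·.1)) k0 k h
          omega
      simp [hg, hnm]
    · -- A scans with fallback max_val + 1; B reaches the same case split
      rw [scanA_eq]
      cases hm : firstMatch? integer ((k0, k1, v) :: rest) with
      | none => simp [hm, hg]
      | some w => simp [hm, hg]
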